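-- pv_equiv track=rewrite | github.com/AntonioLujanoLuna/sim | emergent_ecosystem/analysis/information_theory.py | _lz77_complexity
-- ===== SOURCE A (Python) =====
-- def _lz77_complexity(string: str) -> int:
--     """Simple LZ77-style compression complexity"""
--     if not string:
--         return 0
--
--     complexity = 0
--     i = 0
--
--     while i < len(string):
--         # Find longest match in previous characters
--         max_length = 0
--         match_pos = -1
--
--         for j in range(max(0, i - 255), i):  # Limited lookback window
--             length = 0
--             while (i + length < len(string) and
--                    j + length < i and
--                    string[i + length] == string[j + length]):
--                 length += 1
--
--             if length > max_length:
--                 max_length = length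
--                 match_pos = j
--
--         if max_length > 2:  # Worthwhile compression
--             i += max_length
--         else:
--             i += 1
--
--         complexity += 1
--
--     return complexity
-- ===== SOURCE B (Python) =====
-- def _lz77_complexity(string: str) -> int:
--     """LZ77-style complexity via a trigram hash index: candidate match positions
--     are found by hashing 3-char prefixes instead of scanning the whole window."""
--     n = len(string)
--     if n == 0:
--         return 0
--
--     index = {}          # trigram -> ascending list of start positions already passed
--     complexity = 0
--     i = 0
--     indexed = 0
--
--     while i < n:
--         # index trigrams of all positions strictly before i
--         while indexed < i and indexed + 2 < n:
--             key = string[indexed:indexed + 3]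
--             index.setdefault(key, []).append(indexed)
--             indexed += 1
--
--         best = 0
--         if i + 2 < n:
--             # only positions whose trigram equals ours can give a match > 2
--             for p in reversed(index.get(string[i:i + 3], [])):
--                 if p + 255 < i:      # out of the lookback window; all earlier ones too
--                     break
--                 if i < p + 3:        # too close: a match of length 3 cannot fit before i
--                     continue
--                 length = 3
--                 while i + length < n and p + length < i and string[i + length] == string[p + length]:
--                     length += 1
--                 if length > best:
--                     best = length
--
--         if best > 2:
--             i += best
--         else:
--             i += 1
--         complexity += 1
--
--     return complexity
-- ===== Notes on version B (the rewrite author's own statement) =====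
-- stated objective: faster
-- what changed: Replaces A's per-position brute-force scan (extend a match from length 0 at every window position) by a gzip-style trigram hash index: positions are indexed by their 3-char prefix as the cursor passes them, and only the positions sharing the current trigram (looked up in a dict, scanned newest-first with an early break at the 255 window) are extended, starting from length 3.
import Mathlib
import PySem

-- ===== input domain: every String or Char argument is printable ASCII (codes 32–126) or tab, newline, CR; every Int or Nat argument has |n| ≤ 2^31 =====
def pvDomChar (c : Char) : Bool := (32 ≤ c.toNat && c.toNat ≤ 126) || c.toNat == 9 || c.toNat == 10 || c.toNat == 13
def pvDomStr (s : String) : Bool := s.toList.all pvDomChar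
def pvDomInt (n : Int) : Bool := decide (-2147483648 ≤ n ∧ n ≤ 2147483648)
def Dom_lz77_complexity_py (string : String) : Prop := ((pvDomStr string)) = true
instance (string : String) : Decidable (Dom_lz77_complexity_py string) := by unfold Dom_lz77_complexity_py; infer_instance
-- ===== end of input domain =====

-- B replaces A's per-position scan of the whole 255-wide window by a trigram hash index
-- (gzip-style): only positions sharing the current 3-char prefix are extended (faster, constant-factor).

-- ===== PORT A =====
-- inner `while` of A: match length between position i and candidate j, starting at `len`
-- (indices are guarded in range by the first two conjuncts, so `getD` is exact)
def pvMlen (s : List Char) (i j len : Nat) : Nat :=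
  if h : i + len < s.length ∧ j + len < i ∧ s.getD (i + len) default = s.getD (j + len) default then
    pvMlen s i j (len + 1)
  else len
termination_by s.length - (i + len)
decreasing_by omega

-- A's `for j in range(max(0, i-255), i)` fold carrying (max_length, match_pos)
-- (Nat subtraction i - 255 is exactly Python's max(0, i - 255))
def pvFindA (s : List Char) (i : Nat) : Nat × Int :=
  (List.range' (i - 255) (i - (i - 255))).foldl
    (fun acc j => let len := pvMlen s i j 0; if acc.1 < len then (len, (j : Int)) else acc)
    (0, -1)

-- A's outer `while i < len(string)` loop
def pvLoopA (s : List Char) (i : Nat) (c : Int) : Int :=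
  if h : i < s.length then
    let m := (pvFindA s i).1
    pvLoopA s (if 2 < m then i + m else i + 1) (c + 1)
  else c
termination_by s.length - i
decreasing_by split <;> omega

def lz77_complexity_py (string : String) : Int :=
  if string.toList.isEmpty then 0 else pvLoopA string.toList 0 0

-- ===== PORT B =====
-- string[p:p+3] (nonnegative in-range slice: drop/take is exact)
def pvTrig (s : List Char) (p : Nat) : List Char := (s.drop p).take 3

-- B's extension `while`, starting from the already-matched trigram (len = 3)
def pvExt (s : List Char) (i p len : Nat) : Nat :=
  if h : i + len < s.length ∧ p + len < i ∧ s.getD (i + len) default = s.getD (p + len) default then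
    pvExt s i p (len + 1)
  else len
termination_by s.length - (i + len)
decreasing_by omega

-- B's indexing `while`: `index.setdefault(key, []).append(indexed)` = modify key [] (· ++ [indexed])
def pvBuild (s : List Char) (indexed i : Nat) (d : PySem.Dict (List Char) (List Nat)) :
    Nat × PySem.Dict (List Char) (List Nat) :=
  if _h : indexed < i ∧ indexed + 2 < s.length then
    pvBuild s (indexed + 1) i (d.modify (pvTrig s indexed) [] (· ++ [indexed]))
  else (indexed, d)
termination_by i - indexed
decreasing_by omega

-- B's `for p in reversed(...)` with break/continue
def pvScan (s : List Char) (i : Nat) (best : Nat) : List Nat → Nat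
  | [] => best
  | p :: rest =>
    if p + 255 < i then best
    else if i < p + 3 then pvScan s i best rest
    else
      let len := pvExt s i p 3
      pvScan s i (if best < len then len else best) rest

def pvBestB (s : List Char) (i : Nat) (d : PySem.Dict (List Char) (List Nat)) : Nat :=
  if i + 2 < s.length then pvScan s i 0 ((d.getD (pvTrig s i) []).reverse) else 0

-- B's outer `while i < n` loop
def pvLoopB (s : List Char) (i indexed : Nat) (d : PySem.Dict (List Char) (List Nat)) (c : Int) : Int :=
  if h : i < s.length then
    let bd := pvBuild s indexed i d
    let best := pvBestB s i bd.2
    pvLoopB s (if 2 < best then i + best else i + 1) bd.1 bd.2 (c + 1)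
  else c
termination_by s.length - i
decreasing_by split <;> omega

def lz77_complexity_py_alt (string : String) : Int :=
  if string.toList.isEmpty then 0 else pvLoopB string.toList 0 0 PySem.Dict.empty 0

-- ===== PRECONDITION & SPEC =====
def Spec_lz77_complexity_py (string : String) (out : Int) : Prop := out = lz77_complexity_py_alt string
instance (string : String) (out : Int) : Decidable (Spec_lz77_complexity_py string out) := by unfold Spec_lz77_complexity_py; infer_instance

-- ===== CLAIM (what is proved, stated in full; the proofs are below) =====
def Claim_equal_lz77_complexity_py : Prop := ∀ (string : String), Dom_lz77_complexity_py string → Spec_lz77_complexity_py string (lz77_complexity_py string)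

-- ===== LEMMAS AND PROOFS =====

-- the canonical trigram index of positions [0, b)
def pvIdx (s : List Char) (b : Nat) : PySem.Dict (List Char) (List Nat) :=
  ((List.range b).map (fun p => (pvTrig s p, p))).foldl
    (fun d q => d.modify q.1 [] (· ++ [q.2])) PySem.Dict.empty

theorem pvIdx_zero (s : List Char) : pvIdx s 0 = PySem.Dict.empty := rfl

theorem pvIdx_succ (s : List Char) (b : Nat) :
    pvIdx s (b + 1) = (pvIdx s b).modify (pvTrig s b) [] (· ++ [b]) := by
  unfold pvIdx
  rw [List.range_succ, List.map_append, List.foldl_append]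
  rfl

theorem pvIdx_getD (s : List Char) (b : Nat) (t : List Char) :
    (pvIdx s b).getD t [] = (List.range b).filter (fun p => pvTrig s p == t) := by
  unfold pvIdx
  rw [PySem.Dict.getD_foldl_modify_append, PySem.Dict.getD_empty, List.nil_append,
    List.filter_map, List.map_map]
  simp [Function.comp_def]

-- the two extension whiles compute the same function
theorem pvMlen_eq_pvExt (s : List Char) (i p len : Nat) : pvMlen s i p len = pvExt s i p len := by
  fun_induction pvMlen s i p len with
  | case1 _ h ih => rw [pvExt, dif_pos h, ih]
  | case2 _ h => rw [pvExt, dif_neg h]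

theorem pvTrig_getD (s : List Char) (p k : Nat) (hk : k < 3) :
    (pvTrig s p).getD k default = s.getD (p + k) default := by
  unfold pvTrig
  simp [List.getD_eq_getElem?_getD, hk]

-- one step of A's inner while when its condition holds
theorem pvMlen_step (s : List Char) (i p len : Nat)
    (h : i + len < s.length ∧ p + len < i ∧ s.getD (i + len) default = s.getD (p + len) default) :
    pvMlen s i p len = pvMlen s i p (len + 1) := by
  rw [pvMlen, dif_pos h]

-- pointwise-equal characters give equal trigrams
theorem pvTrig_eq_of (s : List Char) (p i : Nat) (hp : p + 2 < s.length) (hi : i + 2 < s.length)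
    (h : ∀ k, k < 3 → s.getD (p + k) default = s.getD (i + k) default) :
    pvTrig s p = pvTrig s i := by
  apply List.ext_getElem?
  intro k
  simp only [pvTrig, List.getElem?_take, List.getElem?_drop]
  by_cases hk : k < 3
  · have hpk : p + k < s.length := by omega
    have hik : i + k < s.length := by omega
    have := h k hk
    rw [List.getD_eq_getElem s default hpk, List.getD_eq_getElem s default hik] at this
    simp [hk, List.getElem?_eq_getElem hpk, List.getElem?_eq_getElem hik, this]
  · simp [hk]

-- mlen ≥ 3 exactly on trigram candidates, where it equals B's extension
theorem pvMlen_cand (s : List Char) (i p : Nat) (hn : i + 2 < s.length) (hp : p + 3 ≤ i)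
    (ht : pvTrig s p = pvTrig s i) : pvMlen s i p 0 = pvExt s i p 3 := by
  have hc : ∀ k, k < 3 → s.getD (i + k) default = s.getD (p + k) default := by
    intro k hk
    rw [← pvTrig_getD s p k hk, ← pvTrig_getD s i k hk, ht]
  rw [pvMlen_step s i p 0 ⟨by omega, by omega, hc 0 (by omega)⟩]
  rw [show (0 + 1 : Nat) = 1 from rfl]
  rw [pvMlen_step s i p 1 ⟨by omega, by omega, hc 1 (by omega)⟩]
  rw [show (1 + 1 : Nat) = 2 from rfl]
  rw [pvMlen_step s i p 2 ⟨by omega, by omega, hc 2 (by omega)⟩]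
  exact pvMlen_eq_pvExt s i p 3

theorem pvMlen_small (s : List Char) (i p : Nat)
    (h : ¬ (i + 2 < s.length ∧ p + 3 ≤ i ∧ pvTrig s p = pvTrig s i)) :
    pvMlen s i p 0 ≤ 2 := by
  by_cases h0 : i + 0 < s.length ∧ p + 0 < i ∧ s.getD (i + 0) default = s.getD (p + 0) default
  · rw [pvMlen_step s i p 0 h0, show (0 + 1 : Nat) = 1 from rfl]
    by_cases h1 : i + 1 < s.length ∧ p + 1 < i ∧ s.getD (i + 1) default = s.getD (p + 1) default
    · rw [pvMlen_step s i p 1 h1, show (1 + 1 : Nat) = 2 from rfl]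
      by_cases h2 : i + 2 < s.length ∧ p + 2 < i ∧ s.getD (i + 2) default = s.getD (p + 2) default
      · exfalso
        apply h
        refine ⟨h2.1, by omega, pvTrig_eq_of s p i (by omega) h2.1 ?_⟩
        intro k hk
        interval_cases k
        · exact h0.2.2.symm
        · exact h1.2.2.symm
        · exact h2.2.2.symm
      · rw [pvMlen, dif_neg h2]
    · rw [pvMlen, dif_neg h1]; omega
  · rw [pvMlen, dif_neg h0]; omega

-- generic foldl-max facts
theorem pvFoldMax_init (f : Nat → Nat) (l : List Nat) (a : Nat) :
    a ≤ l.foldl (fun m p => max m (f p)) a := by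
  induction l generalizing a with
  | nil => simp
  | cons x xs ih => exact le_trans (le_max_left a (f x)) (ih (max a (f x)))

theorem pvFoldMax_le (f : Nat → Nat) (l : List Nat) (a k : Nat) (ha : a ≤ k)
    (h : ∀ x ∈ l, f x ≤ k) : l.foldl (fun m p => max m (f p)) a ≤ k := by
  induction l generalizing a with
  | nil => simpa
  | cons x xs ih =>
    simp only [List.foldl_cons]
    exact ih (max a (f x)) (by simp [ha, h x (by simp)]) (fun y hy => h y (by simp [hy]))

theorem pvFoldMax_mem (f : Nat → Nat) (l : List Nat) (a : Nat) (x : Nat) (hx : x ∈ l) :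
    f x ≤ l.foldl (fun m p => max m (f p)) a := by
  induction l generalizing a with
  | nil => simp at hx
  | cons y ys ih =>
    simp only [List.foldl_cons]
    rcases List.mem_cons.1 hx with rfl | hx'
    · exact le_trans (le_max_right a (f x)) (pvFoldMax_init f ys _)
    · exact ih _ hx'

theorem pvFoldMax_attained (f : Nat → Nat) (l : List Nat) (a : Nat) :
    l.foldl (fun m p => max m (f p)) a = a ∨ ∃ x ∈ l, l.foldl (fun m p => max m (f p)) a = f x := by
  induction l generalizing a with
  | nil => left; rfl
  | cons x xs ih =>
    simp only [List.foldl_cons]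
    rcases ih (max a (f x)) with h | ⟨y, hy, hEq⟩
    · rw [h]
      rcases Nat.le_total a (f x) with hle | hle
      · right; exact ⟨x, by simp, by omega⟩
      · left; omega
    · right; exact ⟨y, by simp [hy], hEq⟩

-- A's fold is a foldl-max
theorem pvFindA_fst (s : List Char) (i : Nat) :
    (pvFindA s i).1 = (List.range' (i - 255) (i - (i - 255))).foldl
      (fun m j => max m (pvMlen s i j 0)) 0 := by
  unfold pvFindA
  generalize List.range' (i - 255) (i - (i - 255)) = l
  suffices h : ∀ (l : List Nat) (m : Nat) (mp : Int),
      (l.foldl (fun acc j => let len := pvMlen s i j 0;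
        if acc.1 < len then (len, (j : Int)) else acc) (m, mp)).1
      = l.foldl (fun m j => max m (pvMlen s i j 0)) m from h l 0 (-1)
  intro l
  induction l with
  | nil => intro m mp; rfl
  | cons x xs ih =>
    intro m mp
    simp only [List.foldl_cons]
    by_cases hc : m < pvMlen s i x 0
    · rw [if_pos hc, ih, Nat.max_eq_right (by omega)]
    · rw [if_neg hc, ih, Nat.max_eq_left (by omega)]

-- the extension never shrinks below its start
theorem pvExt_ge (s : List Char) (i p len : Nat) : len ≤ pvExt s i p len := by
  fun_induction pvExt s i p len with
  | case1 _ h ih => omega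
  | case2 _ h => exact le_refl _

-- B's reversed scan-with-break is a foldl-max over the window-filtered candidates
theorem pvScan_eq (s : List Char) (i : Nat) (r : List Nat) (hr : List.Pairwise (· > ·) r) (best : Nat) :
    pvScan s i best r = (r.filter (fun p => decide (i ≤ p + 255) && decide (p + 3 ≤ i))).foldl
      (fun m p => max m (pvExt s i p 3)) best := by
  induction r generalizing best with
  | nil => rfl
  | cons p rest ih =>
    have hrest := List.pairwise_cons.1 hr
    rw [pvScan]
    by_cases h1 : p + 255 < i
    · rw [if_pos h1]
      have hf : rest.filter (fun q => decide (i ≤ q + 255) && decide (q + 3 ≤ i)) = [] := by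
        rw [List.filter_eq_nil_iff]
        intro q hq
        have := hrest.1 q hq
        simp only [Bool.and_eq_true, decide_eq_true_eq]
        omega
      rw [List.filter_cons_of_neg (by simp; omega), hf]
      rfl
    · rw [if_neg h1]
      by_cases h2 : i < p + 3
      · rw [if_pos h2, ih hrest.2]
        rw [List.filter_cons_of_neg (by simp; omega)]
      · rw [if_neg h2]
        rw [ih hrest.2]
        rw [List.filter_cons_of_pos (by simp; omega)]
        simp only [List.foldl_cons]
        congr 1
        rcases Nat.lt_or_ge best (pvExt s i p 3) with hc | hc
        · rw [if_pos hc, Nat.max_eq_right (by omega)]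
        · rw [if_neg (by omega), Nat.max_eq_left (by omega)]

-- the build loop keeps the canonical index and stops having indexed everything needed
theorem pvBuild_inv (s : List Char) (i : Nat) : ∀ fuel b, i - b ≤ fuel → b ≤ i → b ≤ s.length - 2 →
    ∃ b', pvBuild s b i (pvIdx s b) = (b', pvIdx s b') ∧ b' ≤ i ∧ b' ≤ s.length - 2 ∧
      (i ≤ b' ∨ s.length ≤ b' + 2) := by
  intro fuel
  induction fuel with
  | zero =>
    intro b hf hbi hbn
    refine ⟨b, ?_, hbi, hbn, by omega⟩
    rw [pvBuild, dif_neg (by omega)]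
  | succ k ih =>
    intro b hf hbi hbn
    by_cases hc : b < i ∧ b + 2 < s.length
    · rw [pvBuild, dif_pos hc, ← pvIdx_succ]
      exact ih (b + 1) (by omega) (by omega) (by omega)
    · refine ⟨b, ?_, hbi, hbn, by omega⟩
      rw [pvBuild, dif_neg hc]

-- the per-position best lengths agree
theorem pvBest_eq (s : List Char) (i b' : Nat) (hb : b' ≤ i) (hstop : i ≤ b' ∨ s.length ≤ b' + 2) :
    pvBestB s i (pvIdx s b') = (if 2 < (pvFindA s i).1 then (pvFindA s i).1 else 0) := by
  have hW : ∀ j, j ∈ List.range' (i - 255) (i - (i - 255)) ↔ i - 255 ≤ j ∧ j < i := by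
    intro j
    rw [List.mem_range'_1]
    omega
  unfold pvBestB
  by_cases hin : i + 2 < s.length
  · rw [if_pos hin, pvIdx_getD]
    have hpw : List.Pairwise (· > ·)
        (((List.range b').filter (fun p => pvTrig s p == pvTrig s i)).reverse) := by
      rw [List.pairwise_reverse]
      exact (List.Pairwise.sublist List.filter_sublist List.pairwise_lt_range).imp (fun h => h)
    rw [pvScan_eq s i _ hpw, pvFindA_fst]
    have hC : ∀ q, q ∈ (((List.range b').filter (fun p => pvTrig s p == pvTrig s i)).reverse.filter
        (fun p => decide (i ≤ p + 255) && decide (p + 3 ≤ i))) ↔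
        q < b' ∧ pvTrig s q = pvTrig s i ∧ i ≤ q + 255 ∧ q + 3 ≤ i := by
      intro q
      simp only [List.mem_filter, List.mem_reverse, List.mem_range, Bool.and_eq_true,
        decide_eq_true_eq, beq_iff_eq]
      tauto
    have hub : ∀ q ∈ (((List.range b').filter (fun p => pvTrig s p == pvTrig s i)).reverse.filter
        (fun p => decide (i ≤ p + 255) && decide (p + 3 ≤ i))), pvExt s i q 3 ≤
        (List.range' (i - 255) (i - (i - 255))).foldl (fun m j => max m (pvMlen s i j 0)) 0 := by
      intro q hq
      obtain ⟨hqb, hqt, hqw, hqi⟩ := (hC q).1 hq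
      rw [← pvMlen_cand s i q hin hqi hqt]
      exact pvFoldMax_mem (fun j => pvMlen s i j 0) _ 0 q ((hW q).2 ⟨by omega, by omega⟩)
    by_cases hM : 2 < (List.range' (i - 255) (i - (i - 255))).foldl
        (fun m j => max m (pvMlen s i j 0)) 0
    · rw [if_pos hM]
      apply Nat.le_antisymm
      · exact pvFoldMax_le _ _ _ _ (by omega) hub
      · rcases pvFoldMax_attained (fun j => pvMlen s i j 0) (List.range' (i - 255) (i - (i - 255))) 0 with h0 | ⟨j, hj, hEq⟩
        · omega
        · obtain ⟨hjw, hji⟩ := (hW j).1 hj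
          obtain ⟨hc1, hc2, hc3⟩ : i + 2 < s.length ∧ j + 3 ≤ i ∧ pvTrig s j = pvTrig s i := by
            by_contra hc
            have := pvMlen_small s i j hc
            omega
          have hjb : j < b' := by
            rcases hstop with h' | h' <;> omega
          rw [hEq, pvMlen_cand s i j hin hc2 hc3]
          exact pvFoldMax_mem (fun p => pvExt s i p 3) _ 0 j ((hC j).2 ⟨hjb, hc3, by omega, hc2⟩)
    · rw [if_neg hM]
      have hnil : (((List.range b').filter (fun p => pvTrig s p == pvTrig s i)).reverse.filter
          (fun p => decide (i ≤ p + 255) && decide (p + 3 ≤ i))) = [] := by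
        rw [List.eq_nil_iff_forall_not_mem]
        intro q hq
        have h3 := pvExt_ge s i q 3
        have := hub q hq
        omega
      rw [hnil]
      rfl
  · rw [if_neg hin, pvFindA_fst]
    have hle : (List.range' (i - 255) (i - (i - 255))).foldl
        (fun m j => max m (pvMlen s i j 0)) 0 ≤ 2 := by
      apply pvFoldMax_le _ _ _ _ (by omega)
      intro j hj
      apply pvMlen_small
      intro hcond
      omega
    rw [if_neg (by omega)]

theorem pvLoop_eq (s : List Char) : ∀ fuel i b c, s.length - i ≤ fuel → b ≤ i → b ≤ s.length - 2 →
    pvLoopB s i b (pvIdx s b) c = pvLoopA s i c := by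
  intro fuel
  induction fuel with
  | zero =>
    intro i b c hf hbi hbn
    rw [pvLoopB, dif_neg (by omega), pvLoopA, dif_neg (by omega)]
  | succ k ih =>
    intro i b c hf hbi hbn
    by_cases h : i < s.length
    · obtain ⟨b', hbd, hb'i, hb'n, hstop⟩ :=
        pvBuild_inv s i (i - b) b le_rfl hbi hbn
      rw [pvLoopB, dif_pos h, pvLoopA, dif_pos h]
      simp only [hbd]
      rw [pvBest_eq s i b' hb'i hstop]
      by_cases hM : 2 < (pvFindA s i).1
      · rw [if_pos hM]
        simp only [if_pos hM]
        exact ih (i + (pvFindA s i).1) b' (c + 1) (by omega) (by omega) hb'n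
      · rw [if_neg hM]
        simp only [if_neg (show ¬ (2 < 0) by omega), if_neg hM]
        exact ih (i + 1) b' (c + 1) (by omega) (by omega) hb'n
    · rw [pvLoopB, dif_neg h, pvLoopA, dif_neg h]

-- ===== VERDICT (by name: the statement is the Claim_ definition above) =====
theorem lz77_complexity_py_spec : Claim_equal_lz77_complexity_py := by
  intro string _
  unfold Spec_lz77_complexity_py lz77_complexity_py lz77_complexity_py_alt
  by_cases h : string.toList.isEmpty
  · simp [h]
  · simp only [h]
    rw [← pvIdx_zero, pvLoop_eq string.toList string.toList.length 0 0 0 (by omega) (by omega) (by omega)]
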